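-- pv_equiv track=rewrite | github.com/IBM/LOA | amr_parser.py | detect_joined_noun_phrases
-- ===== SOURCE A (Python) =====
-- def detect_joined_noun_phrases(sent, join_token='of', self_assign=False):
--     words = sent.split()
--     token_dict = {}
--     for k, token in enumerate(words):
--         if k >= 1 and k < len(words) - 1 and token == join_token:
--             full_ent = ' '.join(words[k - 1:k + 2])
--             token_dict[words[k - 1]] = full_ent
--             token_dict[words[k + 1]] = full_ent
--             if self_assign:
--                 token_dict[full_ent] = full_ent
--     return token_dict
-- ===== SOURCE B (Python) =====
-- def detect_joined_noun_phrases(sent, join_token='of', self_assign=False):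
--     words = sent.split()
--     token_dict = {}
--     start = 1
--     while True:
--         try:
--             i = words.index(join_token, start)
--         except ValueError:
--             return token_dict
--         if i < len(words) - 1:
--             full_ent = ' '.join((words[i - 1], join_token, words[i + 1]))
--             token_dict[words[i - 1]] = full_ent
--             token_dict[words[i + 1]] = full_ent
--             if self_assign:
--                 token_dict[full_ent] = full_ent
--         start = i + 1
-- ===== Notes on version B (the rewrite author's own statement) =====
-- stated objective: alternative
-- what changed: Instead of enumerating every word and guard-testing each position, B repeatedly searches for the next occurrence of join_token with list.index(join_token, start) in a while loop terminated by ValueError, processing only the matching positions.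
import Mathlib
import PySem

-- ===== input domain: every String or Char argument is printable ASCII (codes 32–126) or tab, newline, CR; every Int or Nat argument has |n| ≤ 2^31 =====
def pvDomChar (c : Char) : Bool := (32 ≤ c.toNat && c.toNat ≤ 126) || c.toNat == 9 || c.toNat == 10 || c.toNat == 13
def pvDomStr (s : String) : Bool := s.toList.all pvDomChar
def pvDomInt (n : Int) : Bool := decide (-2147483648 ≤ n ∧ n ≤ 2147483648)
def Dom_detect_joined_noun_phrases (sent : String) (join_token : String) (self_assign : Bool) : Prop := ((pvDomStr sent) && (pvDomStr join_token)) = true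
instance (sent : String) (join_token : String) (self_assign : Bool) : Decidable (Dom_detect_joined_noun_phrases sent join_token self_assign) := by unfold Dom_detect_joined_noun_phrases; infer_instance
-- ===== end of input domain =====

-- B replaces A's enumerate-every-word loop by a while loop that jumps from one
-- join_token occurrence to the next via list.index(join_token, start); same return value.

-- ===== PORT A =====
-- one loop iteration of A: k-indexed, guarded by 1 <= k < len(words)-1, slices words[k-1:k+2]
def pvStepA (words : List String) (join_token : String) (self_assign : Bool)
    (d : PySem.Dict String String) (kt : Int × String) : PySem.Dict String String :=
  if 1 ≤ kt.1 ∧ kt.1 < (words.length : Int) - 1 ∧ kt.2 = join_token then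
    let full_ent := PySem.Str.join " " (PySem.List.slice words (some (kt.1 - 1)) (some (kt.1 + 2)))
    let d := d.insert (PySem.List.pyGetD words (kt.1 - 1) "") full_ent
    let d := d.insert (PySem.List.pyGetD words (kt.1 + 1) "") full_ent
    if self_assign then d.insert full_ent full_ent else d
  else d

def detect_joined_noun_phrases (sent : String) (join_token : String) (self_assign : Bool) : List (String × String) :=
  let words := PySem.Str.split₀ sent
  ((PySem.List.enumerate words).foldl (pvStepA words join_token self_assign) PySem.Dict.empty).items

-- ===== PORT B =====
-- words.index(join_token, start): first index ≥ start holding join_token (none = ValueError);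
-- exact: Python's list.index with a start argument searches words[start:] and reports the absolute index
def pvIndexFrom (ws : List String) (jt : String) (start : Nat) : Option Nat :=
  (PySem.List.index? (ws.drop start) jt).map (start + ·)

-- the body of B's while loop at a found index i: record the 3-word phrase if i is interior
def pvUpd (ws : List String) (jt : String) (sa : Bool) (i : Nat)
    (d : PySem.Dict String String) : PySem.Dict String String :=
  if i < ws.length - 1 then
    let full_ent := PySem.Str.join " " [ws.getD (i - 1) "", jt, ws.getD (i + 1) ""]
    let d := d.insert (ws.getD (i - 1) "") full_ent
    let d := d.insert (ws.getD (i + 1) "") full_ent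
    if sa then d.insert full_ent full_ent else d
  else d

-- bounds of a successful search (cited by pvLoopB's decreasing_by)
lemma pvIndexFrom_bounds {ws : List String} {jt : String} {start i : Nat}
    (h : pvIndexFrom ws jt start = some i) : start ≤ i ∧ i < ws.length := by
  unfold pvIndexFrom at h
  cases hk : PySem.List.index? (ws.drop start) jt with
  | none => rw [hk] at h; simp at h
  | some k =>
      rw [hk] at h
      simp at h
      obtain ⟨hlt, -, -⟩ := PySem.List.getElem_of_index?_eq_some hk
      simp [List.length_drop] at hlt
      omega

-- the while loop of B: find the next join_token at index ≥ start, process it, continue past it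
def pvLoopB (ws : List String) (jt : String) (sa : Bool) (start : Nat)
    (d : PySem.Dict String String) : PySem.Dict String String :=
  match h : pvIndexFrom ws jt start with
  | none => d
  | some i => pvLoopB ws jt sa (i + 1) (pvUpd ws jt sa i d)
termination_by ws.length - start
decreasing_by
  obtain ⟨h1, h2⟩ := pvIndexFrom_bounds h
  omega

def detect_joined_noun_phrases_alt (sent : String) (join_token : String) (self_assign : Bool) : List (String × String) :=
  let words := PySem.Str.split₀ sent
  (pvLoopB words join_token self_assign 1 PySem.Dict.empty).items

-- ===== PRECONDITION & SPEC =====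
def Spec_detect_joined_noun_phrases (sent : String) (join_token : String) (self_assign : Bool) (out : List (String × String)) : Prop := out = detect_joined_noun_phrases_alt sent join_token self_assign
instance (sent : String) (join_token : String) (self_assign : Bool) (out : List (String × String)) : Decidable (Spec_detect_joined_noun_phrases sent join_token self_assign out) := by unfold Spec_detect_joined_noun_phrases; infer_instance

-- ===== CLAIM (what is proved, stated in full; the proofs are below) =====
def Claim_equal_detect_joined_noun_phrases : Prop := ∀ (sent : String) (join_token : String) (self_assign : Bool), Dom_detect_joined_noun_phrases sent join_token self_assign → Spec_detect_joined_noun_phrases sent join_token self_assign (detect_joined_noun_phrases sent join_token self_assign)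

-- ===== LEMMAS AND PROOFS =====

lemma pvLoopB_none {ws : List String} {jt : String} {sa : Bool} {start : Nat}
    {d : PySem.Dict String String} (h : pvIndexFrom ws jt start = none) :
    pvLoopB ws jt sa start d = d := by
  rw [pvLoopB]
  split
  · rfl
  · rename_i i heq; rw [h] at heq; cases heq

lemma pvLoopB_some {ws : List String} {jt : String} {sa : Bool} {start i : Nat}
    {d : PySem.Dict String String} (h : pvIndexFrom ws jt start = some i) :
    pvLoopB ws jt sa start d = pvLoopB ws jt sa (i + 1) (pvUpd ws jt sa i d) := by
  rw [pvLoopB]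
  split
  · rename_i heq; rw [h] at heq; cases heq
  · rename_i i' heq; rw [h] at heq; cases heq; rfl

lemma pvIndexFrom_none {ws : List String} {jt : String} {start : Nat}
    (h : pvIndexFrom ws jt start = none) : jt ∉ ws.drop start := by
  unfold pvIndexFrom at h
  cases hk : PySem.List.index? (ws.drop start) jt with
  | none => exact (PySem.List.index?_eq_none_iff _ _).mp hk
  | some k => rw [hk] at h; simp at h

lemma pvIndexFrom_split {ws : List String} {jt : String} {start i : Nat}
    (h : pvIndexFrom ws jt start = some i) :
    ∃ pre suf, ws.drop start = pre ++ jt :: suf ∧ pre.length = i - start ∧ jt ∉ pre ∧ start ≤ i := by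
  unfold pvIndexFrom at h
  cases hk : PySem.List.index? (ws.drop start) jt with
  | none => rw [hk] at h; simp at h
  | some k =>
      rw [hk] at h
      simp at h
      obtain ⟨pre, suf, hsplit, hlen, hnot⟩ := (PySem.List.index?_eq_some_iff _ _ _).mp hk
      exact ⟨pre, suf, hsplit, by omega, hnot, by omega⟩

-- A's steps on positions whose token is not join_token do nothing
lemma pvFold_skip (ws : List String) (jt : String) (sa : Bool) :
    ∀ (s : List String) (n : Int) (d : PySem.Dict String String), jt ∉ s →
      (PySem.List.enumerate s n).foldl (pvStepA ws jt sa) d = d := by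
  intro s
  induction s with
  | nil => intro n d _; simp [PySem.List.enumerate_nil]
  | cons x tl ih =>
      intro n d hmem
      rw [PySem.List.enumerate_cons, List.foldl_cons]
      have hx : pvStepA ws jt sa d (n, x) = d := by
        unfold pvStepA
        rw [if_neg]
        rintro ⟨-, -, hx⟩
        have hx' : x = jt := hx
        exact hmem (by rw [← hx']; exact List.mem_cons_self)
      rw [hx]
      exact ih (n + 1) d (fun h => hmem (List.mem_cons_of_mem _ h))

-- A's guarded step at a join_token occurrence i computes exactly B's loop body pvUpd
lemma pvStep_eq_upd (ws : List String) (jt : String) (sa : Bool) (i : Nat)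
    (hi : 1 ≤ i) (hdropi : ws.drop i = jt :: ws.drop (i + 1))
    (d0 : PySem.Dict String String) :
    pvStepA ws jt sa d0 ((i : Int), jt) = pvUpd ws jt sa i d0 := by
  have hilen : i < ws.length := by
    have := congrArg List.length hdropi
    simp [List.length_drop] at this
    omega
  unfold pvStepA pvUpd
  dsimp only
  by_cases hlt : i < ws.length - 1
  · rw [if_pos ⟨by exact_mod_cast hi, by omega, rfl⟩, if_pos hlt]
    have hi1 : i - 1 < ws.length := by omega
    have hdropi1 : ws.drop (i - 1) = ws[i - 1] :: jt :: ws[i + 1] :: ws.drop (i + 2) := by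
      rw [List.drop_eq_getElem_cons hi1, show i - 1 + 1 = i by omega, hdropi,
          List.drop_eq_getElem_cons (by omega), show i + 1 + 1 = i + 2 from rfl]
    have e1 : (i : Int) - 1 = ((i - 1 : Nat) : Int) := by omega
    have e2 : (i : Int) + 2 = ((i + 2 : Nat) : Int) := by omega
    have e3 : (i : Int) + 1 = ((i + 1 : Nat) : Int) := by omega
    rw [e1, e2, e3, PySem.List.slice_natCast, PySem.List.pyGetD_natCast,
        PySem.List.pyGetD_natCast, show (i + 2) - (i - 1) = 3 by omega, hdropi1]
    have g1 : ws.getD (i - 1) "" = ws[i - 1] := List.getD_eq_getElem _ _ hi1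
    have g2 : ws.getD (i + 1) "" = ws[i + 1] := List.getD_eq_getElem _ _ (by omega)
    rw [g1, g2]
    rfl
  · rw [if_neg (by rintro ⟨-, hb, -⟩; omega), if_neg hlt]

-- core correspondence: A's fold over the enumerated suffix from index start ≥ 1
-- equals B's search-and-jump loop started at start
lemma pvMain (ws : List String) (jt : String) (sa : Bool) :
    ∀ (n start : Nat) (s : List String) (d : PySem.Dict String String),
      ws.drop start = s → ws.length - start ≤ n → 1 ≤ start →
      (PySem.List.enumerate s (start : Int)).foldl (pvStepA ws jt sa) d
        = pvLoopB ws jt sa start d := by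
  intro n
  induction n with
  | zero =>
      intro start s d hds hn hs
      have hdrop : ws.drop start = [] := List.drop_eq_nil_of_le (by omega)
      have hidx : pvIndexFrom ws jt start = none := by
        unfold pvIndexFrom
        rw [hdrop]
        simp
      rw [pvLoopB_none hidx, ← hds, hdrop]
      simp [PySem.List.enumerate_nil]
  | succ n ih =>
      intro start s d hds hn hs
      cases hidx : pvIndexFrom ws jt start with
      | none =>
          rw [pvLoopB_none hidx, ← hds]
          exact pvFold_skip ws jt sa _ _ d (pvIndexFrom_none hidx)
      | some i =>
          obtain ⟨hsi, hilen⟩ := pvIndexFrom_bounds hidx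
          obtain ⟨pre, suf, hsplit, hprelen, hnotpre, -⟩ := pvIndexFrom_split hidx
          have hdropi : ws.drop i = jt :: suf := by
            have h1 : ws.drop i = (ws.drop start).drop (i - start) := by
              rw [List.drop_drop]; congr 1; omega
            rw [h1, hsplit, ← hprelen, List.drop_left' rfl]
          have hsuf : suf = ws.drop (i + 1) := by
            have h1 : ws.drop (i + 1) = (ws.drop i).drop 1 := by rw [List.drop_drop]
            rw [h1, hdropi]; rfl
          have hdropi' : ws.drop i = jt :: ws.drop (i + 1) := by rw [hdropi, hsuf]
          rw [← hds, hsplit, PySem.List.enumerate_append, List.foldl_append,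
              pvFold_skip ws jt sa pre _ d hnotpre, hprelen,
              show (start : Int) + ((i - start : Nat) : Int) = (i : Int) by omega,
              PySem.List.enumerate_cons, List.foldl_cons,
              pvStep_eq_upd ws jt sa i (by omega) hdropi' d,
              show ((i : Int) + 1) = (((i + 1 : Nat) : Int)) by push_cast; ring,
              ih (i + 1) suf _ hsuf.symm (by omega) (by omega)]
          exact (pvLoopB_some hidx).symm

-- ===== VERDICT (by name: the statement is the Claim_ definition above) =====
theorem detect_joined_noun_phrases_spec : Claim_equal_detect_joined_noun_phrases := by
  intro sent jt sa _
  unfold Spec_detect_joined_noun_phrases detect_joined_noun_phrases detect_joined_noun_phrases_alt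
  cases hws : PySem.Str.split₀ sent with
  | nil =>
      dsimp only
      have hidx : pvIndexFrom [] jt 1 = none := by
        simp [pvIndexFrom]
      rw [pvLoopB_none hidx]
      simp [PySem.List.enumerate_nil]
  | cons w tl =>
      dsimp only
      congr 1
      rw [show PySem.List.enumerate (w :: tl) = PySem.List.enumerate (w :: tl) 0 from rfl,
          PySem.List.enumerate_cons, List.foldl_cons]
      have hstep : pvStepA (w :: tl) jt sa PySem.Dict.empty (0, w) = PySem.Dict.empty := by
        unfold pvStepA
        rw [if_neg]
        rintro ⟨h1, -, -⟩
        omega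
      rw [hstep, show ((0 : Int) + 1) = ((1 : Nat) : Int) by norm_num]
      exact pvMain (w :: tl) jt sa (w :: tl).length 1 tl PySem.Dict.empty rfl (by omega) (by omega)
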